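-- pv_equiv track=rewrite | github.com/Siddhartha-chauhan/COMPANY_MASTER | src/company_registration_per_year.py | calculate
-- ===== SOURCE A (Python) =====
-- def calculate(data):
--     """Count how many companies registered each year"""
--     year_counts = {}
--
--     for row in data:
--         date = row.get("CompanyRegistrationdate_date", "")
--         if date:
--             year = date[:4]  # extract first 4 chars (YYYY)
--             if year.isdigit():
--                 year_counts[year] = year_counts.get(year, 0) + 1
--
--     return dict(sorted(year_counts.items()))  # sort by year
-- ===== SOURCE B (Python) =====
-- def calculate(data):
--     """Count how many companies registered each year: collect the valid year
--     prefixes, sort them, then run-length scan the sorted list (groups are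
--     contiguous), yielding keys already in ascending order."""
--     years = sorted(
--         row.get("CompanyRegistrationdate_date", "")[:4]
--         for row in data
--         if row.get("CompanyRegistrationdate_date", "")
--         and row.get("CompanyRegistrationdate_date", "")[:4].isdigit()
--     )
--     counts = {}
--     i, n = 0, len(years)
--     while i < n:
--         j = i + 1
--         while j < n and years[j] == years[i]:
--             j += 1
--         counts[years[i]] = j - i
--         i = j
--     return counts
-- ===== Notes on version B (the rewrite author's own statement) =====
-- stated objective: alternative
-- what changed: Replaces A's dict-counting pass followed by sorting the (year,count) items with a sort-then-group strategy: B sorts the list of valid year prefixes first and then run-length scans the sorted list, emitting each year with its group length in ascending key order.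
import Mathlib
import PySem

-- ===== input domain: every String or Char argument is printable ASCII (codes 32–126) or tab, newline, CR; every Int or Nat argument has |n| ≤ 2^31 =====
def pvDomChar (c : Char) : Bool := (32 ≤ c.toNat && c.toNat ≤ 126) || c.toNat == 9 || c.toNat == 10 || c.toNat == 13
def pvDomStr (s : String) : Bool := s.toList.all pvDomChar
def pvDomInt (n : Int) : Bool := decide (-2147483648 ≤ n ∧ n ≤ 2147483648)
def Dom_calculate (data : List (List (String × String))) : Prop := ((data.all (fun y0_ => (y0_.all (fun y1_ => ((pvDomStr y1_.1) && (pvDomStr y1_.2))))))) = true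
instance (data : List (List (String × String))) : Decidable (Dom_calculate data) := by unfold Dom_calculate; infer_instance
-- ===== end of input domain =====

-- B changes the algorithm only: instead of A's dict-count-then-sort-items, B sorts the
-- extracted year prefixes and run-length scans the sorted list; same return value.

-- ===== PORT A =====
-- literal port of A: fold a counting dict over the rows, then sort its items
-- (Python's default tuple comparison on items = sorted2 with keys fst, snd)
def calculate (data : List (List (String × String))) : List (String × Int) :=
  let year_counts : PySem.Dict String Int :=
    data.foldl (fun yc row =>
      let date := PySem.Dict.getD (PySem.Dict.ofList row) "CompanyRegistrationdate_date" ""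
      if date ≠ "" then
        let year := PySem.Str.slice date none (some 4)
        if PySem.Str.strIsdigit year then yc.insert year (yc.getD year 0 + 1) else yc
      else yc) PySem.Dict.empty
  PySem.List.sorted2 year_counts.items Prod.fst Prod.snd

-- ===== PORT B =====
-- the comprehension's filter/map: keep date[:4] when date is truthy and date[:4].isdigit()
def pvKeepYear (row : List (String × String)) : Option String :=
  let date := PySem.Dict.getD (PySem.Dict.ofList row) "CompanyRegistrationdate_date" ""
  let year := PySem.Str.slice date none (some 4)
  if (!(date == "")) && PySem.Str.strIsdigit year then some year else none

-- the two nested while loops: emit the head with the length of its run, recurse past the run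
def pvRun : List String → List (String × Int)
  | [] => []
  | y :: rest =>
    (y, 1 + ((rest.takeWhile (fun z => z == y)).length : Int)) ::
      pvRun (rest.dropWhile (fun z => z == y))
termination_by s => s.length
decreasing_by
  exact Nat.lt_succ_of_le (List.length_dropWhile_le (fun z => z == y) rest)

def calculate_alt (data : List (List (String × String))) : List (String × Int) :=
  let years := PySem.List.sorted (data.filterMap pvKeepYear) (fun y => y) false
  pvRun years

-- ===== PRECONDITION & SPEC =====
def Spec_calculate (data : List (List (String × String))) (out : List (String × Int)) : Prop := out = calculate_alt data
instance (data : List (List (String × String))) (out : List (String × Int)) : Decidable (Spec_calculate data out) := by unfold Spec_calculate; infer_instance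

-- ===== CLAIM (what is proved, stated in full; the proofs are below) =====
def Claim_equal_calculate : Prop := ∀ (data : List (List (String × String))), Dom_calculate data → Spec_calculate data (calculate data)

-- ===== LEMMAS AND PROOFS =====

-- one row of A's loop, phrased through B's extraction function
theorem pv_step (d : PySem.Dict String Int) (row : List (String × String)) :
    (let date := PySem.Dict.getD (PySem.Dict.ofList row) "CompanyRegistrationdate_date" ""
     if date ≠ "" then
       let year := PySem.Str.slice date none (some 4)
       if PySem.Str.strIsdigit year then d.insert year (d.getD year 0 + 1) else d
     else d)
    = (match pvKeepYear row with
       | some y => d.insert y (d.getD y 0 + 1)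
       | none => d) := by
  by_cases hd : PySem.Dict.getD (PySem.Dict.ofList row) "CompanyRegistrationdate_date" "" = ""
  · simp [pvKeepYear, hd]
  · by_cases hdig : PySem.Chars.strIsdigit (PySem.List.slice (PySem.Dict.getD (PySem.Dict.ofList row) "CompanyRegistrationdate_date" "").toList none (some 4)) = true
    · simp [pvKeepYear, hd, hdig]
    · simp [pvKeepYear, hd, hdig]

-- A's fold over rows is the plain counting fold over the extracted year list
theorem pv_fold_eq (data : List (List (String × String))) :
    ∀ (d : PySem.Dict String Int),
    data.foldl (fun yc row =>
      let date := PySem.Dict.getD (PySem.Dict.ofList row) "CompanyRegistrationdate_date" ""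
      if date ≠ "" then
        let year := PySem.Str.slice date none (some 4)
        if PySem.Str.strIsdigit year then yc.insert year (yc.getD year 0 + 1) else yc
      else yc) d
    = (data.filterMap pvKeepYear).foldl (fun d x => d.insert x (d.getD x 0 + 1)) d := by
  induction data with
  | nil => intro d; rfl
  | cons row rest ih =>
    intro d
    simp only [List.foldl_cons, List.filterMap_cons]
    rw [ih, pv_step]
    cases hk : pvKeepYear row <;> simp

-- insertBy with comparisons that agree against every member of the target list
theorem pv_insertBy_congr {α : Type} (b1 b2 : α → α → Bool) (x : α) (ys : List α)
    (h : ∀ y ∈ ys, b1 x y = b2 x y) :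
    PySem.List.insertBy b1 x ys = PySem.List.insertBy b2 x ys := by
  induction ys with
  | nil => rfl
  | cons y t ih =>
    have hy := h y (by simp)
    simp only [PySem.List.insertBy, hy]
    split
    · rfl
    · rw [ih (fun z hz => h z (by simp [hz]))]

theorem pv_foldl_insertBy_congr (b1 b2 : (String × Int) → (String × Int) → Bool)
    (hb : ∀ a y : String × Int, a.1 ≠ y.1 → b1 a y = b2 a y) :
    ∀ (xs acc : List (String × Int)), (xs.map Prod.fst).Nodup →
      (∀ a ∈ xs, ∀ c ∈ acc, a.1 ≠ c.1) →
      xs.foldl (fun acc x => PySem.List.insertBy b1 x acc) acc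
        = xs.foldl (fun acc x => PySem.List.insertBy b2 x acc) acc := by
  intro xs
  induction xs with
  | nil => intro acc _ _; rfl
  | cons x t ih =>
    intro acc hnd hdisj
    simp only [List.foldl_cons]
    have hx : PySem.List.insertBy b1 x acc = PySem.List.insertBy b2 x acc :=
      pv_insertBy_congr b1 b2 x acc (fun c hc => hb x c (hdisj x (by simp) c hc))
    rw [hx]
    apply ih
    · exact (List.nodup_cons.mp (by simpa using hnd)).2
    · intro a ha c hc
      have hc' : c = x ∨ c ∈ acc := by
        have := (PySem.List.insertBy_perm b2 x acc).mem_iff.mp hc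
        simpa using this
      rcases hc' with rfl | hc'
      · have hx1 : c.1 ∉ t.map Prod.fst := (List.nodup_cons.mp (by simpa using hnd)).1
        intro heq
        exact hx1 (by rw [← heq]; exact List.mem_map_of_mem ha)
      · exact hdisj a (by simp [ha]) c hc'

-- on pairs with pairwise-distinct first components, tuple sorting is sorting by fst
theorem pv_sorted2_eq_sorted (xs : List (String × Int)) (h : (xs.map Prod.fst).Nodup) :
    PySem.List.sorted2 xs Prod.fst Prod.snd = PySem.List.sorted xs Prod.fst := by
  unfold PySem.List.sorted2 PySem.List.sorted
  simp only [if_neg (by simp : ¬ (false = true))]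
  apply pv_foldl_insertBy_congr _ _ _ xs [] h (by intro a _ c hc; simp at hc)
  intro a y hne
  rcases lt_trichotomy a.1 y.1 with hlt | heq | hgt
  · simp [hlt, not_lt_of_gt hlt]
  · exact absurd heq hne
  · simp [hgt, not_lt_of_gt hgt]

-- everything past the head's run is strictly above the head
theorem pv_drop_lt (y : String) (rest : List String)
    (h : (y :: rest).Pairwise (· ≤ ·)) :
    ∀ w ∈ rest.dropWhile (fun z => z == y), y < w := by
  have hle : ∀ v ∈ rest, y ≤ v := (List.pairwise_cons.mp h).1
  have hrp : (rest.dropWhile (fun z => z == y)).Pairwise (· ≤ ·) :=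
    List.Pairwise.sublist (List.dropWhile_sublist _) (List.pairwise_cons.mp h).2
  have hmem : ∀ v ∈ rest.dropWhile (fun z => z == y), v ∈ rest :=
    fun v hv => List.Sublist.mem hv (List.dropWhile_sublist _)
  intro w hw
  cases hr : rest.dropWhile (fun z => z == y) with
  | nil => rw [hr] at hw; simp at hw
  | cons z tl =>
    have hz' : (z == y) = false := by
      have := List.head?_dropWhile_not (fun z => z == y) rest
      rw [hr] at this
      simpa using this
    have hzy : z ≠ y := by simpa using hz'
    have hyz : y < z := lt_of_le_of_ne (hle z (hmem z (by rw [hr]; simp))) (Ne.symm hzy)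
    rw [hr] at hw
    rcases List.mem_cons.mp hw with rfl | hw'
    · exact hyz
    · have : z ≤ w := by
        rw [hr] at hrp
        exact (List.pairwise_cons.mp hrp).1 w hw'
      exact lt_of_lt_of_le hyz this

theorem pv_foldl_add_skip (t : List String) :
    ∀ (acc : PySem.Set String) (y : String), (∀ z ∈ t, z = y) → acc.contains y = true →
    t.foldl PySem.Set.add acc = acc := by
  induction t with
  | nil => intro acc y _ _; rfl
  | cons z t ih =>
    intro acc y hall hcon
    have hz : z = y := hall z (by simp)
    have : PySem.Set.add acc z = acc := by
      simp only [PySem.Set.add, hz, hcon, if_true]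
    simp only [List.foldl_cons, this]
    exact ih acc y (fun w hw => hall w (by simp [hw])) hcon

theorem pv_foldl_add_cons (l : List String) :
    ∀ (s : List String) (a : String), a ∉ l →
    l.foldl PySem.Set.add (a :: s) = a :: l.foldl PySem.Set.add s := by
  induction l with
  | nil => intro s a _; rfl
  | cons z t ih =>
    intro s a hnot
    have hza : (z == a) = false := by
      simp only [beq_eq_false_iff_ne]
      intro hz; exact hnot (by simp [hz.symm])
    have hstep : PySem.Set.add (a :: s) z = a :: PySem.Set.add s z := by
      simp only [PySem.Set.add, PySem.Set.contains, List.contains_cons, hza, Bool.false_or]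
      split
      · rfl
      · simp
    simp only [List.foldl_cons, hstep]
    exact ih _ a (fun hm => hnot (by simp [hm]))

theorem pv_ofList_run (y : String) (rest : List String)
    (h : (y :: rest).Pairwise (· ≤ ·)) :
    (PySem.Set.ofList (y :: rest) : List String)
      = y :: PySem.Set.ofList (rest.dropWhile (fun z => z == y)) := by
  have hsplit : rest = rest.takeWhile (fun z => z == y) ++ rest.dropWhile (fun z => z == y) :=
    (List.takeWhile_append_dropWhile).symm
  have h1 : (PySem.Set.ofList (y :: rest) : List String)
      = (rest.takeWhile (fun z => z == y) ++ rest.dropWhile (fun z => z == y)).foldl PySem.Set.add [y] := by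
    simp only [PySem.Set.ofList, List.foldl_cons]
    rw [← hsplit]
    rfl
  rw [h1, List.foldl_append]
  have h2 : (rest.takeWhile (fun z => z == y)).foldl PySem.Set.add [y] = ([y] : List String) := by
    apply pv_foldl_add_skip _ _ y
    · intro z hz; simpa using List.mem_takeWhile_imp hz
    · simp [PySem.Set.contains]
  rw [h2]
  have hnot : y ∉ rest.dropWhile (fun z => z == y) := by
    intro hm
    exact absurd (pv_drop_lt y rest h y hm) (lt_irrefl y)
  have := pv_foldl_add_cons (rest.dropWhile (fun z => z == y)) [] y hnot
  simpa [PySem.Set.ofList, PySem.Set.empty] using this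

theorem pv_ofList_lt : ∀ (s : List String), s.Pairwise (· ≤ ·) →
    (PySem.Set.ofList s : List String).Pairwise (· < ·) := by
  intro s
  induction s using pvRun.induct with
  | case1 => intro _; simp [PySem.Set.ofList, PySem.Set.empty]
  | case2 y rest ih =>
    intro h
    rw [pv_ofList_run y rest h]
    refine List.pairwise_cons.mpr ⟨?_, ?_⟩
    · intro k hk
      exact pv_drop_lt y rest h k ((PySem.Set.mem_ofList _ _).mp hk)
    · exact ih (List.Pairwise.sublist (List.dropWhile_sublist _) (List.pairwise_cons.mp h).2)

theorem pv_run_spec : ∀ (s : List String), s.Pairwise (· ≤ ·) →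
    pvRun s = (PySem.Set.ofList s : List String).map (fun k => (k, (s.count k : Int))) := by
  intro s
  induction s using pvRun.induct with
  | case1 => intro _; simp [pvRun, PySem.Set.ofList, PySem.Set.empty]
  | case2 y rest ih =>
    intro h
    have hsplit : rest.takeWhile (fun z => z == y) ++ rest.dropWhile (fun z => z == y) = rest :=
      List.takeWhile_append_dropWhile
    have htall : ∀ z ∈ rest.takeWhile (fun z => z == y), y = z :=
      fun z hz => ((by simpa using List.mem_takeWhile_imp hz : z = y)).symm
    have hynr : ∀ w ∈ rest.dropWhile (fun z => z == y), y ≠ w :=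
      fun w hw => ne_of_lt (pv_drop_lt y rest h w hw)
    have hcr : rest.count y = (rest.takeWhile (fun z => z == y)).length := by
      conv_lhs => rw [← hsplit]
      rw [List.count_append, List.count_eq_length.mpr htall,
        List.count_eq_zero.mpr (fun hm => hynr y hm rfl), Nat.add_zero]
    have hcy : (y :: rest).count y = 1 + (rest.takeWhile (fun z => z == y)).length := by
      rw [List.count_cons_self, hcr]; omega
    rw [pvRun, pv_ofList_run y rest h, List.map_cons]
    congr 1
    · rw [hcy]; push_cast; ring_nf
    · rw [ih (List.Pairwise.sublist (List.dropWhile_sublist _) (List.pairwise_cons.mp h).2)]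
      apply List.map_congr_left
      intro k hk
      have hkr : k ∈ rest.dropWhile (fun z => z == y) := (PySem.Set.mem_ofList _ _).mp hk
      have hky : k ≠ y := fun hkk => hynr k hkr hkk.symm
      have hcnt : (y :: rest).count k = (rest.dropWhile (fun z => z == y)).count k := by
        rw [List.count_cons_of_ne hky.symm]
        conv_lhs => rw [← hsplit]
        rw [List.count_append, List.count_eq_zero.mpr (fun hm => hky (htall k hm).symm),
          Nat.zero_add]
      rw [hcnt]

-- ===== VERDICT (by name: the statement is the Claim_ definition above) =====
theorem calculate_spec : Claim_equal_calculate := by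
  intro data _
  unfold Spec_calculate calculate calculate_alt
  rw [pv_fold_eq data PySem.Dict.empty,
    PySem.Dict.foldl_insert_getD_add_one_eq_counter (data.filterMap pvKeepYear)]
  have hitems := PySem.Dict.items_counter (data.filterMap pvKeepYear)
  have hnod : (((PySem.Dict.counter (data.filterMap pvKeepYear)).items).map Prod.fst).Nodup := by
    rw [hitems, List.map_map]
    have : (Prod.fst ∘ fun k => (k, ((data.filterMap pvKeepYear).count k : Int)))
        = fun k => k := by funext k; rfl
    rw [this, List.map_id']
    exact PySem.Set.nodup_ofList (data.filterMap pvKeepYear)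
  rw [pv_sorted2_eq_sorted _ hnod]
  have hs_pair : (PySem.List.sorted (data.filterMap pvKeepYear) (fun y => y) false).Pairwise (· ≤ ·) :=
    PySem.List.sorted_pairwise (data.filterMap pvKeepYear) (fun y => y)
  rw [pv_run_spec _ hs_pair]
  have hcount : ∀ k : String,
      (PySem.List.sorted (data.filterMap pvKeepYear) (fun y => y) false).count k
        = (data.filterMap pvKeepYear).count k :=
    fun k => (PySem.List.sorted_perm (data.filterMap pvKeepYear) (fun y => y) false).count_eq k
  have hmapeq : (PySem.Set.ofList (PySem.List.sorted (data.filterMap pvKeepYear) (fun y => y) false) : List String).map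
        (fun k => (k, ((PySem.List.sorted (data.filterMap pvKeepYear) (fun y => y) false).count k : Int)))
      = (PySem.Set.ofList (PySem.List.sorted (data.filterMap pvKeepYear) (fun y => y) false) : List String).map
        (fun k => (k, ((data.filterMap pvKeepYear).count k : Int))) := by
    apply List.map_congr_left; intro k _; rw [hcount k]
  have hsetperm : (PySem.Set.ofList (PySem.List.sorted (data.filterMap pvKeepYear) (fun y => y) false) : List String).Perm
      (PySem.Set.ofList (data.filterMap pvKeepYear) : List String) := by
    rw [List.perm_ext_iff_of_nodup (PySem.Set.nodup_ofList _) (PySem.Set.nodup_ofList _)]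
    intro a
    rw [PySem.Set.mem_ofList, PySem.Set.mem_ofList, PySem.List.mem_sorted]
  apply PySem.List.sorted_eq_of_perm_of_pairwise_lt
  · rw [hmapeq, hitems]
    exact hsetperm.map _
  · rw [hmapeq]
    exact List.Pairwise.map _ (fun a b hab => hab) (pv_ofList_lt _ hs_pair)
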